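-- pv_equiv track=rewrite | github.com/marialysyuk/Google-Kick-Start | 2020/Round H/Boring Numbers/Boring Numbers.py | boring_number
-- ===== SOURCE A (Python) =====
-- def boring_number(num):
--     amount = -1
--     for i in range(len(str(num))):
--         amount += 5**i
--     nums = [int(d) for d in str(num)]
--     length = len(str(num))
--     evens = set()
--     evens.add(0)
--     evens.add(2)
--     evens.add(4)
--     evens.add(6)
--     evens.add(8)
--     odds = set()
--     odds.add(1)
--     odds.add(3)
--     odds.add(5)
--     odds.add(7)
--     odds.add(9)
--     for i in range(length):
--         count = 0
--         left = length-(i+1)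
--         if i == length-1:
--             if (i+1) % 2 == 0:
--                 for j in evens:
--                     if j <= nums[i]:
--                         count += 1
--             else:
--                 for k in odds:
--                     if k <= nums[i]:
--                         count += 1
--
--         elif (i+1) % 2 == 0:
--             for j in evens:
--                 if j < nums[i]:
--                     count += 1
--         else:
--             for k in odds:
--                 if k < nums[i]:
--                     count += 1
--         amount += count*5**left
--         if (i+1) % 2 == 0 and nums[i] % 2 == 1:
--             break
--         if (i+1) % 2 == 1 and nums[i] % 2 == 0:
--             break
--     return amount
-- ===== SOURCE B (Python) =====
-- def boring_number(num):
--     digits = [int(d) for d in str(num)]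
--
--     def rank(ds, want_odd):
--         # number of boring digit-strings of this length that are <= ds
--         if not ds:
--             return 1
--         d, rest = ds[0], ds[1:]
--         below = (d // 2 if want_odd else (d + 1) // 2) * 5 ** len(rest)
--         if d % 2 == (1 if want_odd else 0):
--             return below + rank(rest, not want_odd)
--         return below
--
--     return (5 ** len(digits) - 5) // 4 + rank(digits, True)
-- ===== Notes on version B (the rewrite author's own statement) =====
-- stated objective: simpler
-- what changed: Replaced A's geometric-series loop, per-digit scans over hand-built even/odd digit sets and break-driven index loop with a single structural recursion over the digit list using closed-form arithmetic counts of shorter lengths and of allowed digits below each digit.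
import Mathlib
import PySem

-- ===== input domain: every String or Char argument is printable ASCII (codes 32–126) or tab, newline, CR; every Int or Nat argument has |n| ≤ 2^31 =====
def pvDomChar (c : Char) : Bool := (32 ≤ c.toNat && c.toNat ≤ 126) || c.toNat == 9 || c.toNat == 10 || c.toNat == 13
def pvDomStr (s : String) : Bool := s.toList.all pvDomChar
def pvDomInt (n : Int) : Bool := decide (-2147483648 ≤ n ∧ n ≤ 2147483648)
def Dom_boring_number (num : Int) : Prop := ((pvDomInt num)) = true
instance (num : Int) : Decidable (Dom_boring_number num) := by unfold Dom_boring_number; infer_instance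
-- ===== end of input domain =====

-- B replaces A's per-digit set scans, break-driven index loop and geometric-series loop by a
-- structural recursion over the digit list with closed-form arithmetic counts (objective: simpler).

-- ===== PORT A =====
-- int(d) for a single character d (exact where the char is a decimal digit; A only reaches digits under Pre_)
def pyIntOfChar (c : Char) : Int := (PySem.Int.ofChars? [c]).getD 0

-- the 'for i in range(length): … break …' loop of A, as index recursion
def boringLoopA (nums : List Int) (length : Nat) (evens odds : List Int) (i : Nat) (amount : Int) : Int :=
  if h : i < length then
    let ni := PySem.List.pyGetD nums (i : Int) 0
    let left := length - (i + 1)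
    let count : Int :=
      if i = length - 1 then
        if (i + 1) % 2 = 0 then
          evens.foldl (fun c j => if j ≤ ni then c + 1 else c) 0
        else
          odds.foldl (fun c k => if k ≤ ni then c + 1 else c) 0
      else if (i + 1) % 2 = 0 then
        evens.foldl (fun c j => if j < ni then c + 1 else c) 0
      else
        odds.foldl (fun c k => if k < ni then c + 1 else c) 0
    let amount' := amount + count * 5 ^ left
    if (i + 1) % 2 = 0 ∧ PySem.Int.mod ni 2 = 1 then amount'
    else if (i + 1) % 2 = 1 ∧ PySem.Int.mod ni 2 = 0 then amount'
    else boringLoopA nums length evens odds (i + 1) amount'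
  else amount
termination_by length - i

def boring_number (num : Int) : Int :=
  let s := PySem.Int.toChars num
  let amount : Int := (PySem.List.pyRange 0 (s.length : Int) 1).foldl (fun a i => a + 5 ^ i.toNat) (-1)
  let nums := s.map pyIntOfChar
  let length := s.length
  let evens : PySem.Set Int :=
    PySem.Set.add (PySem.Set.add (PySem.Set.add (PySem.Set.add (PySem.Set.add PySem.Set.empty 0) 2) 4) 6) 8
  let odds : PySem.Set Int :=
    PySem.Set.add (PySem.Set.add (PySem.Set.add (PySem.Set.add (PySem.Set.add PySem.Set.empty 1) 3) 5) 7) 9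
  boringLoopA nums length evens odds 0 amount

-- ===== PORT B =====
-- number of boring digit strings of this length that are ≤ ds, given the required parity of the first position
def rankB : List Int → Bool → Int
  | [], _ => 1
  | d :: rest, wantOdd =>
    let below := (if wantOdd then PySem.Int.floordiv d 2 else PySem.Int.floordiv (d + 1) 2) * 5 ^ rest.length
    if PySem.Int.mod d 2 = (if wantOdd then 1 else 0) then below + rankB rest (!wantOdd)
    else below

def boring_number_alt (num : Int) : Int :=
  let digits := (PySem.Int.toChars num).map pyIntOfChar
  PySem.Int.floordiv (5 ^ digits.length - 5) 4 + rankB digits true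

-- ===== PRECONDITION & SPEC =====
-- Pre_ excludes negative num, on which A raises ValueError (int('-') inside the digit comprehension).
def Pre_boring_number (num : Int) : Prop := 0 ≤ num
instance (num : Int) : Decidable (Pre_boring_number num) := by unfold Pre_boring_number; infer_instance
def pvWitness_boring_number : Int := (42)

def Spec_boring_number (num : Int) (out : Int) : Prop := out = boring_number_alt num
instance (num : Int) (out : Int) : Decidable (Spec_boring_number num out) := by unfold Spec_boring_number; infer_instance

-- ===== CLAIM (what is proved, stated in full; the proofs are below) =====
def Claim_equal_boring_number : Prop := ∀ (num : Int), Dom_boring_number num → Pre_boring_number num → Spec_boring_number num (boring_number num)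

-- ===== LEMMAS AND PROOFS =====

-- every char produced by Nat.toDigitsCore is a digit char (or came from the accumulator)
lemma tdc_mem : ∀ (fuel n : Nat) (ds : List Char) (c : Char),
    c ∈ Nat.toDigitsCore 10 fuel n ds → c ∈ ds ∨ ∃ k, k < 10 ∧ c = Nat.digitChar k := by
  intro fuel
  induction fuel with
  | zero => intro n ds c h; exact Or.inl h
  | succ f ih =>
    intro n ds c h
    simp only [Nat.toDigitsCore] at h
    by_cases hn : n / 10 = 0
    · simp only [hn] at h
      rcases List.mem_cons.mp h with h1 | h1
      · exact Or.inr ⟨n % 10, Nat.mod_lt _ (by omega), h1⟩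
      · exact Or.inl h1
    · rw [if_neg hn] at h
      rcases ih (n / 10) (Nat.digitChar (n % 10) :: ds) c h with h1 | h1
      · rcases List.mem_cons.mp h1 with h2 | h2
        · exact Or.inr ⟨n % 10, Nat.mod_lt _ (by omega), h2⟩
        · exact Or.inl h2
      · exact Or.inr h1

lemma tdc_len_le : ∀ (fuel n : Nat) (ds : List Char),
    ds.length ≤ (Nat.toDigitsCore 10 fuel n ds).length := by
  intro fuel
  induction fuel with
  | zero => intro n ds; simp [Nat.toDigitsCore]
  | succ f ih =>
    intro n ds
    simp only [Nat.toDigitsCore]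
    by_cases hn : n / 10 = 0
    · simp [hn]
    · rw [if_neg hn]
      calc ds.length ≤ (Nat.digitChar (n % 10) :: ds).length := by simp
        _ ≤ _ := ih (n / 10) _

lemma toDigits_ne_nil (n : Nat) : Nat.toDigits 10 n ≠ [] := by
  unfold Nat.toDigits
  intro h
  have h1 := tdc_len_le (n + 1) n []
  cases hf : Nat.toDigitsCore 10 (n + 1) n [] with
  | nil =>
    have := congrArg List.length hf
    simp only [Nat.toDigitsCore] at hf
    by_cases hn : n / 10 = 0
    · simp [hn] at hf
    · rw [if_neg hn] at hf
      have h2 := tdc_len_le n (n / 10) (Nat.digitChar (n % 10) :: [])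
      rw [hf] at h2
      simp at h2
  | cons a l => rw [hf] at h; exact absurd h (by simp)

lemma pyIntOfChar_digit (k : Nat) (hk : k < 10) :
    0 ≤ pyIntOfChar (Nat.digitChar k) ∧ pyIntOfChar (Nat.digitChar k) ≤ 9 := by
  interval_cases k <;> decide

lemma nums_bounds (num : Int) (h : 0 ≤ num) :
    ∀ d ∈ (PySem.Int.toChars num).map pyIntOfChar, 0 ≤ d ∧ d ≤ 9 := by
  intro d hd
  rcases List.mem_map.mp hd with ⟨c, hc, rfl⟩
  rw [PySem.Int.toChars, if_neg (by omega)] at hc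
  rcases tdc_mem _ _ _ _ hc with h1 | ⟨k, hk, rfl⟩
  · simp at h1
  · exact pyIntOfChar_digit k hk

lemma toChars_ne_nil (num : Int) (h : 0 ≤ num) : PySem.Int.toChars num ≠ [] := by
  rw [PySem.Int.toChars, if_neg (by omega)]
  exact toDigits_ne_nil _

lemma cntLt_evens (d : Int) (h0 : 0 ≤ d) (h9 : d ≤ 9) :
    (([0,2,4,6,8] : List Int).foldl (fun c j => if j < d then c + 1 else c) 0 : Int)
      = PySem.Int.floordiv (d + 1) 2 := by interval_cases d <;> decide
lemma cntLt_odds (d : Int) (h0 : 0 ≤ d) (h9 : d ≤ 9) :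
    (([1,3,5,7,9] : List Int).foldl (fun c k => if k < d then c + 1 else c) 0 : Int)
      = PySem.Int.floordiv d 2 := by interval_cases d <;> decide
lemma cntLe_evens (d : Int) (h0 : 0 ≤ d) (h9 : d ≤ 9) :
    (([0,2,4,6,8] : List Int).foldl (fun c j => if j ≤ d then c + 1 else c) 0 : Int)
      = PySem.Int.floordiv (d + 1) 2 + (if PySem.Int.mod d 2 = 0 then 1 else 0) := by
  interval_cases d <;> decide
lemma cntLe_odds (d : Int) (h0 : 0 ≤ d) (h9 : d ≤ 9) :
    (([1,3,5,7,9] : List Int).foldl (fun c k => if k ≤ d then c + 1 else c) 0 : Int)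
      = PySem.Int.floordiv d 2 + (if PySem.Int.mod d 2 = 1 then 1 else 0) := by
  interval_cases d <;> decide

lemma loopA_eq (nums : List Int) (hb : ∀ d ∈ nums, 0 ≤ d ∧ d ≤ 9) :
    ∀ (k i : Nat) (amount : Int), nums.length - i = k → i < nums.length →
      boringLoopA nums nums.length ([0,2,4,6,8] : List Int) ([1,3,5,7,9] : List Int) i amount
        = amount + rankB (nums.drop i) (decide ((i + 1) % 2 = 1)) := by
  intro k
  induction k with
  | zero => intro i amount hk hi; omega
  | succ k ih =>
    intro i amount hk hi
    have hget : PySem.List.pyGetD nums (i : Int) 0 = nums[i] := by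
      rw [PySem.List.pyGetD_natCast]
      exact List.getD_eq_getElem _ _ hi
    have hdmem : nums[i] ∈ nums := List.getElem_mem hi
    obtain ⟨hd0, hd9⟩ := hb _ hdmem
    have hdrop : nums.drop i = nums[i] :: nums.drop (i + 1) := List.drop_eq_getElem_cons hi
    have hmod : PySem.Int.mod nums[i] 2 = nums[i] % 2 :=
      PySem.Int.mod_eq_emod_of_pos (by norm_num)
    rw [boringLoopA]
    rw [dif_pos hi, hget, hdrop]
    dsimp only
    simp only [rankB]
    rw [hmod]
    by_cases hlast : i = nums.length - 1
    · -- last position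
      have hlen : i + 1 = nums.length := by omega
      have hdrop1 : nums.drop (i + 1) = [] := List.drop_eq_nil_of_le (by omega)
      have hleft : nums.length - (i + 1) = 0 := by omega
      rw [if_pos hlast, hdrop1, hleft, pow_zero]
      by_cases hpar : (i + 1) % 2 = 0
      · have hw : decide ((i + 1) % 2 = 1) = false := by
          simp only [decide_eq_false_iff_not]; omega
        rw [hw, if_pos hpar]
        rw [cntLe_evens _ hd0 hd9, hmod]
        simp only [Bool.false_eq_true, Bool.not_false, List.length_nil, pow_zero, reduceIte]
        rcases Int.emod_two_eq nums[i] with hm | hm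
        · rw [if_pos hm, if_neg (by omega : ¬((i+1) % 2 = 0 ∧ nums[i] % 2 = 1)),
              if_neg (by omega : ¬((i+1) % 2 = 1 ∧ nums[i] % 2 = 0))]
          rw [boringLoopA, dif_neg (by omega), if_pos hm]
          simp only [rankB]
          ring
        · rw [if_neg (by omega : ¬ nums[i] % 2 = 0),
              if_pos (⟨hpar, hm⟩ : (i+1) % 2 = 0 ∧ nums[i] % 2 = 1),
              if_neg (by omega : ¬ nums[i] % 2 = 0)]
          ring
      · have hpar1 : (i + 1) % 2 = 1 := by omega
        have hw : decide ((i + 1) % 2 = 1) = true := by simp [hpar1]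
        rw [hw, if_neg hpar]
        rw [cntLe_odds _ hd0 hd9, hmod]
        simp only [Bool.not_true, List.length_nil, pow_zero, reduceIte]
        rcases Int.emod_two_eq nums[i] with hm | hm
        · rw [if_neg (by omega : ¬ nums[i] % 2 = 1),
              if_neg (by omega : ¬((i+1) % 2 = 0 ∧ nums[i] % 2 = 1)),
              if_pos (⟨hpar1, hm⟩ : (i+1) % 2 = 1 ∧ nums[i] % 2 = 0),
              if_neg (by omega : ¬ nums[i] % 2 = 1)]
          ring
        · rw [if_pos hm,
              if_neg (by omega : ¬((i+1) % 2 = 0 ∧ nums[i] % 2 = 1)),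
              if_neg (by omega : ¬((i+1) % 2 = 1 ∧ nums[i] % 2 = 0))]
          rw [boringLoopA, dif_neg (by omega), if_pos hm]
          simp only [rankB]
          ring
    · -- not the last position
      have hi1 : i + 1 < nums.length := by omega
      have hleft : nums.length - (i + 1) = (nums.drop (i + 1)).length := by simp
      rw [if_neg hlast, hleft]
      by_cases hpar : (i + 1) % 2 = 0
      · have hw : decide ((i + 1) % 2 = 1) = false := by
          simp only [decide_eq_false_iff_not]; omega
        rw [hw, cntLt_evens _ hd0 hd9]
        simp only [Bool.false_eq_true, Bool.not_false, reduceIte]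
        rw [if_pos hpar]
        rcases Int.emod_two_eq nums[i] with hm | hm
        · rw [if_pos hm, if_neg (by omega : ¬((i+1) % 2 = 0 ∧ nums[i] % 2 = 1)),
              if_neg (by omega : ¬((i+1) % 2 = 1 ∧ nums[i] % 2 = 0))]
          rw [ih (i + 1) _ (by omega) hi1]
          have hw2 : decide ((i + 1 + 1) % 2 = 1) = true := by
            simp only [decide_eq_true_eq]; omega
          rw [hw2]
          ring
        · rw [if_neg (by omega : ¬ nums[i] % 2 = 0),
              if_pos (⟨hpar, hm⟩ : (i+1) % 2 = 0 ∧ nums[i] % 2 = 1)]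
      · have hpar1 : (i + 1) % 2 = 1 := by omega
        have hw : decide ((i + 1) % 2 = 1) = true := by simp [hpar1]
        rw [hw, cntLt_odds _ hd0 hd9]
        simp only [Bool.not_true, reduceIte]
        rw [if_neg hpar]
        rcases Int.emod_two_eq nums[i] with hm | hm
        · rw [if_neg (by omega : ¬ nums[i] % 2 = 1),
              if_neg (by omega : ¬((i+1) % 2 = 0 ∧ nums[i] % 2 = 1)),
              if_pos (⟨hpar1, hm⟩ : (i+1) % 2 = 1 ∧ nums[i] % 2 = 0)]
        · rw [if_pos hm, if_neg (by omega : ¬((i+1) % 2 = 0 ∧ nums[i] % 2 = 1)),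
              if_neg (by omega : ¬((i+1) % 2 = 1 ∧ nums[i] % 2 = 0))]
          rw [ih (i + 1) _ (by omega) hi1]
          have hw2 : decide ((i + 1 + 1) % 2 = 1) = false := by
            simp only [decide_eq_false_iff_not]; omega
          rw [hw2]
          ring

-- the initial geometric-series loop of A equals B's closed form
lemma amount0_eq (L : Nat) :
    ((PySem.List.pyRange 0 (L : Int) 1).foldl (fun a i => a + 5 ^ i.toNat) (-1) : Int)
      = PySem.Int.floordiv (5 ^ L - 5) 4 := by
  have key : ∀ M : Nat, (4 : Int) * ((List.range M).foldl (fun a (i : Nat) => a + 5 ^ i) (-1)) = 5 ^ M - 5 := by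
    intro M
    induction M with
    | zero => simp
    | succ m ih =>
      rw [List.range_succ, List.foldl_append]
      simp only [List.foldl_cons, List.foldl_nil]
      rw [mul_add, ih]; ring
  rw [PySem.List.pyRange_zero_natCast, List.foldl_map]
  have hsim : ((List.range L).foldl (fun a (k : Nat) => a + 5 ^ ((k : Int)).toNat) (-1) : Int)
      = (List.range L).foldl (fun a (i : Nat) => a + 5 ^ i) (-1) := by simp
  rw [hsim, eq_comm]
  rw [PySem.Int.floordiv_eq_iff_of_pos (by norm_num)]
  have := key L
  constructor <;> omega

-- ===== VERDICT (by name: the statement is the Claim_ definition above) =====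
theorem boring_number_spec : Claim_equal_boring_number := by
  intro num _hdom hpre
  unfold Spec_boring_number boring_number boring_number_alt
  have hpre' : (0 : Int) ≤ num := hpre
  have hne : PySem.Int.toChars num ≠ [] := toChars_ne_nil num hpre'
  have hb := nums_bounds num hpre'
  have hlen : 0 < (PySem.Int.toChars num).length := List.length_pos_iff.mpr hne
  have hE : (PySem.Set.add (PySem.Set.add (PySem.Set.add (PySem.Set.add (PySem.Set.add PySem.Set.empty (0:Int)) 2) 4) 6) 8 : List Int) = [0,2,4,6,8] := by decide
  have hO : (PySem.Set.add (PySem.Set.add (PySem.Set.add (PySem.Set.add (PySem.Set.add PySem.Set.empty (1:Int)) 3) 5) 7) 9 : List Int) = [1,3,5,7,9] := by decide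
  dsimp only
  rw [hE, hO]
  have hmap : ((PySem.Int.toChars num).map pyIntOfChar).length = (PySem.Int.toChars num).length :=
    List.length_map ..
  rw [← hmap]
  rw [loopA_eq ((PySem.Int.toChars num).map pyIntOfChar) hb
        (((PySem.Int.toChars num).map pyIntOfChar).length - 0) 0 _ rfl (by omega)]
  rw [List.drop_zero, amount0_eq]
  rw [hmap]
  rfl
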